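-- pv_equiv track=rewrite | github.com/atillaorgunmat/powerbi-rsm | tools/generate_qchain_maps.py | mermaid_mindmap
-- ===== SOURCE A (Python) =====
-- def _label(n):
--     return (n.get("title") or n.get("text") or n["id"])
--
-- def _esc_mm_text(s: str) -> str:
--     # Mermaid mindmap is sensitive to [] and {} tokens
--     return (s or "").replace("[","(").replace("]",")").replace("{","(").replace("}",")")
--
-- def mermaid_mindmap(all_nodes):
--     # Only Q-nodes in the mindmap (keeps it readable)
--     q_nodes = [n for n in all_nodes if n["type"] == "q"]
--     by_mod = {}
--     for n in q_nodes:
--         by_mod.setdefault(n["module"], []).append(n)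
--     lines = ["```mermaid", "mindmap", "  root((Q-Chain))"]
--     for mod, qs in sorted(by_mod.items()):
--         lines.append(f"    {_esc_mm_text(mod)}")
--         for q in sorted(qs, key=lambda x: x["id"]):
--             title = _esc_mm_text(_label(q))
--             lines.append(f"      {q['id']}[{q['id']} — {title}]")
--             if q.get("status"):
--                 lines.append(f"        status: {_esc_mm_text(q['status'])}")
--     lines.append("```")
--     return "\n".join(lines)
-- ===== SOURCE B (Python) =====
-- # B: no grouping dict -- dedup the module names, sort them once, and build the
-- # body as one nested comprehension filtering q-nodes per module (same output).
--
-- def _esc_mm_text(s: str) -> str: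
--     return (s or "").replace("[","(").replace("]",")").replace("{","(").replace("}",")")
--
-- def _node_lines(q):
--     title = _esc_mm_text(q.get("title") or q.get("text") or q["id"])
--     out = [f"      {q['id']}[{q['id']} — {title}]"]
--     if q.get("status"):
--         out.append(f"        status: {_esc_mm_text(q['status'])}")
--     return out
--
-- def mermaid_mindmap(all_nodes):
--     q_nodes = [n for n in all_nodes if n["type"] == "q"]
--     body = [line
--             for mod in sorted(dict.fromkeys(n["module"] for n in q_nodes))
--             for line in [f"    {_esc_mm_text(mod)}"]
--                         + [l for q in sorted((n for n in q_nodes if n["module"] == mod),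
--                                              key=lambda x: x["id"])
--                              for l in _node_lines(q)]]
--     return "\n".join(["```mermaid", "mindmap", "  root((Q-Chain))"] + body + ["```"])
-- ===== Notes on version B (the rewrite author's own statement) =====
-- stated objective: alternative
-- what changed: Replaced A's grouping dict (setdefault/append then sorted(items)) by a dedup of the module names sorted once, with the body built as a single nested comprehension that filters q-nodes per module.
import Mathlib
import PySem

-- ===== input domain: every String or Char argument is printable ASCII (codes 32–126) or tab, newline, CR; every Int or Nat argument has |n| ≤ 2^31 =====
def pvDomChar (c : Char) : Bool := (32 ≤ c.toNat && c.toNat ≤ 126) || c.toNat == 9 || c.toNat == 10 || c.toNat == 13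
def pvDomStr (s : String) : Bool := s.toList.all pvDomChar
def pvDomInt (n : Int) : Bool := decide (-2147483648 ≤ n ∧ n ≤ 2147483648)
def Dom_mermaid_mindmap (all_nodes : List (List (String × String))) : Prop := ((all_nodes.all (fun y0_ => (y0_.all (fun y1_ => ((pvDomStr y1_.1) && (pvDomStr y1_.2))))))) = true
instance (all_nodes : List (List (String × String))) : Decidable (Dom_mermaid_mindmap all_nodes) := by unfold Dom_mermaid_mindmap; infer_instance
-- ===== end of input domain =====

-- B replaces A's grouping dict by a dedup-sort of the module names with a per-module
-- filter, building the body as one flatMap (objective: alternative decomposition).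

-- shared helpers (both Pythons share _esc_mm_text; dict lookup = first match per the convention)
-- n.get(k, missing ≡ "") — exact for A/B because every use treats "" and a missing key alike
def pvNget (n : List (String × String)) (k : String) : String :=
  (((n.find? (fun p => p.1 == k)).map (fun p => p.2)).getD "")

def pvEsc (s : String) : String :=
  PySem.Str.replace (PySem.Str.replace (PySem.Str.replace (PySem.Str.replace s "[" "(") "]" ")") "{" "(") "}" ")"

-- _label(n) = n.get("title") or n.get("text") or n["id"]  (empty string is falsy, like a missing key)
def pvLabel (n : List (String × String)) : String :=
  if pvNget n "title" ≠ "" then pvNget n "title"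
  else if pvNget n "text" ≠ "" then pvNget n "text"
  else pvNget n "id"

-- ===== PORT A =====
-- by_mod.setdefault(m, []).append(n) ≡ by_mod[m] = by_mod.get(m, []) + [n] = Dict.modify m [] (· ++ [n])
-- sorted(by_mod.items()) compares the (distinct) keys first, so the value component is never compared: key = fst
def mermaid_mindmap (all_nodes : List (List (String × String))) : String :=
  let q_nodes := all_nodes.filter (fun n => pvNget n "type" == "q")
  let by_mod := q_nodes.foldl
    (fun d n => d.modify (pvNget n "module") [] (fun l => l ++ [n])) PySem.Dict.empty
  let lines := ["```mermaid", "mindmap", "  root((Q-Chain))"]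
  let lines := (PySem.List.sorted by_mod.items (fun p => p.1) false).foldl (fun lines p =>
    let lines := lines ++ ["    " ++ pvEsc p.1]
    (PySem.List.sorted p.2 (fun x => pvNget x "id") false).foldl (fun lines q =>
      let title := pvEsc (pvLabel q)
      let lines := lines ++ ["      " ++ pvNget q "id" ++ "[" ++ pvNget q "id" ++ " — " ++ title ++ "]"]
      if pvNget q "status" ≠ "" then lines ++ ["        status: " ++ pvEsc (pvNget q "status")]
      else lines) lines) lines
  PySem.Str.join "\n" (lines ++ ["```"])

-- ===== PORT B =====
def pvNodeLines (q : List (String × String)) : List String :=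
  let title := pvEsc (pvLabel q)
  let out := ["      " ++ pvNget q "id" ++ "[" ++ pvNget q "id" ++ " — " ++ title ++ "]"]
  if pvNget q "status" ≠ "" then out ++ ["        status: " ++ pvEsc (pvNget q "status")]
  else out

def mermaid_mindmap_alt (all_nodes : List (List (String × String))) : String :=
  let q_nodes := all_nodes.filter (fun n => pvNget n "type" == "q")
  let body :=
    (PySem.List.sorted (PySem.List.dedup (q_nodes.map (fun n => pvNget n "module")))
        (fun x => x) false).flatMap (fun mod =>
      ("    " ++ pvEsc mod) ::
        (PySem.List.sorted (q_nodes.filter (fun n => pvNget n "module" == mod))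
            (fun x => pvNget x "id") false).flatMap pvNodeLines)
  PySem.Str.join "\n" (["```mermaid", "mindmap", "  root((Q-Chain))"] ++ body ++ ["```"])

-- ===== PRECONDITION & SPEC =====
-- Pre_ excludes exactly the inputs where Python A raises KeyError: a node without "type",
-- or a q-node without "module" or "id".
def Pre_mermaid_mindmap (all_nodes : List (List (String × String))) : Prop :=
  ∀ n ∈ all_nodes, (n.find? (fun p => p.1 == "type")).isSome ∧
    (pvNget n "type" = "q" →
      (n.find? (fun p => p.1 == "module")).isSome ∧ (n.find? (fun p => p.1 == "id")).isSome)
instance (all_nodes : List (List (String × String))) : Decidable (Pre_mermaid_mindmap all_nodes) := by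
  unfold Pre_mermaid_mindmap; infer_instance

def pvWitness_mermaid_mindmap : (List (List (String × String))) :=
  [[("type", "q"), ("module", "M1"), ("id", "Q1"), ("status", "done")],
   [("type", "q"), ("module", "M0"), ("id", "Q2"), ("title", "t[2]")],
   [("type", "note"), ("text", "x")]]

def Spec_mermaid_mindmap (all_nodes : List (List (String × String))) (out : String) : Prop := out = mermaid_mindmap_alt all_nodes
instance (all_nodes : List (List (String × String))) (out : String) : Decidable (Spec_mermaid_mindmap all_nodes out) := by unfold Spec_mermaid_mindmap; infer_instance

-- ===== CLAIM (what is proved, stated in full; the proofs are below) =====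
def Claim_equal_mermaid_mindmap : Prop := ∀ (all_nodes : List (List (String × String))), Dom_mermaid_mindmap all_nodes → Pre_mermaid_mindmap all_nodes → Spec_mermaid_mindmap all_nodes (mermaid_mindmap all_nodes)

-- ===== LEMMAS AND PROOFS =====

-- the grouping dict's entry at m holds exactly the q-nodes of module m, in input order
theorem pv_dict_getD (qs : List (List (String × String))) (m : String) :
    (qs.foldl (fun d n => d.modify (pvNget n "module") [] (fun l => l ++ [n]))
      PySem.Dict.empty).getD m []
    = qs.filter (fun n => pvNget n "module" == m) := by
  have h : qs.foldl (fun d n => d.modify (pvNget n "module") [] (fun l => l ++ [n])) PySem.Dict.empty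
      = (qs.map (fun n => (pvNget n "module", n))).foldl
          (fun d p => d.modify p.1 [] (fun l => l ++ [p.2])) PySem.Dict.empty := by
    rw [List.foldl_map]
  rw [h, PySem.Dict.getD_foldl_modify_append]
  simp [List.filter_map, Function.comp_def]

theorem pv_dict_keys (qs : List (List (String × String))) :
    (qs.foldl (fun d n => d.modify (pvNget n "module") [] (fun l => l ++ [n]))
      PySem.Dict.empty).keys
    = PySem.Set.ofList (qs.map (fun n => pvNget n "module")) := by
  rw [PySem.Dict.keys_foldl_modify_key]
  simp [PySem.Dict.keys_empty, PySem.Set.update_nil_left]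

theorem pv_sorted_items (qs : List (List (String × String))) :
    PySem.List.sorted
      (qs.foldl (fun d n => d.modify (pvNget n "module") [] (fun l => l ++ [n]))
        PySem.Dict.empty).items (fun p => p.1) false
    = (PySem.List.sorted (PySem.Set.ofList (qs.map (fun n => pvNget n "module")))
        (fun x => x) false).map
        (fun m => (m, qs.filter (fun n => pvNget n "module" == m))) := by
  set d := qs.foldl (fun d n => d.modify (pvNget n "module") [] (fun l => l ++ [n])) PySem.Dict.empty with hd
  have hnd : d.keys.Nodup := by
    apply PySem.Dict.nodup_keys_foldl_modify_key
    exact PySem.Dict.nodup_keys_empty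
  have hitems : d.items = d.keys.map (fun k => (k, d.getD k [])) :=
    PySem.Dict.items_eq_map_keys d hnd []
  apply PySem.List.sorted_eq_of_perm_of_pairwise_lt
  · -- Perm
    rw [hitems]
    have hperm : (PySem.List.sorted (PySem.Set.ofList (qs.map (fun n => pvNget n "module"))) (fun x => x) false).Perm d.keys := by
      rw [pv_dict_keys]
      exact PySem.List.sorted_perm _ _ _
    have := hperm.map (fun k => (k, d.getD k []))
    refine (List.Perm.trans ?_ this).symm.symm
    apply List.Perm.of_eq
    congr 1
    funext m
    rw [pv_dict_getD]
  · -- pairwise <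
    have h1 := PySem.List.sorted_ofList_pairwise_lt (xs := qs.map (fun n => pvNget n "module"))
    exact h1.map _ (by intro a b hab; simpa using hab)

-- the inner line-emitting loop appends pvNodeLines of each node
theorem pv_inner_fold (l : List (List (String × String))) (acc : List String) :
    l.foldl (fun lines q =>
      let title := pvEsc (pvLabel q)
      let lines := lines ++ ["      " ++ pvNget q "id" ++ "[" ++ pvNget q "id" ++ " — " ++ title ++ "]"]
      if pvNget q "status" ≠ "" then lines ++ ["        status: " ++ pvEsc (pvNget q "status")]
      else lines) acc
    = acc ++ l.flatMap pvNodeLines := by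
  have h : (fun (lines : List String) q =>
      let title := pvEsc (pvLabel q)
      let lines := lines ++ ["      " ++ pvNget q "id" ++ "[" ++ pvNget q "id" ++ " — " ++ title ++ "]"]
      if pvNget q "status" ≠ "" then lines ++ ["        status: " ++ pvEsc (pvNget q "status")]
      else lines)
      = fun lines q => lines ++ pvNodeLines q := by
    funext lines q
    simp only [pvNodeLines]
    split_ifs <;> simp
  rw [h, PySem.List.foldl_append_eq_flatMap]

theorem pv_outer_fold (ps : List (String × List (List (String × String)))) (acc : List String) :
    ps.foldl (fun lines p =>
      let lines := lines ++ ["    " ++ pvEsc p.1]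
      (PySem.List.sorted p.2 (fun x => pvNget x "id") false).foldl (fun lines q =>
        let title := pvEsc (pvLabel q)
        let lines := lines ++ ["      " ++ pvNget q "id" ++ "[" ++ pvNget q "id" ++ " — " ++ title ++ "]"]
        if pvNget q "status" ≠ "" then lines ++ ["        status: " ++ pvEsc (pvNget q "status")]
        else lines) lines) acc
    = acc ++ ps.flatMap (fun p =>
        ("    " ++ pvEsc p.1) ::
          (PySem.List.sorted p.2 (fun x => pvNget x "id") false).flatMap pvNodeLines) := by
  have h : (fun (lines : List String) (p : String × List (List (String × String))) =>
      let lines := lines ++ ["    " ++ pvEsc p.1]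
      (PySem.List.sorted p.2 (fun x => pvNget x "id") false).foldl (fun lines q =>
        let title := pvEsc (pvLabel q)
        let lines := lines ++ ["      " ++ pvNget q "id" ++ "[" ++ pvNget q "id" ++ " — " ++ title ++ "]"]
        if pvNget q "status" ≠ "" then lines ++ ["        status: " ++ pvEsc (pvNget q "status")]
        else lines) lines)
      = fun lines p => lines ++ (("    " ++ pvEsc p.1) ::
          (PySem.List.sorted p.2 (fun x => pvNget x "id") false).flatMap pvNodeLines) := by
    funext lines p
    simp only [pv_inner_fold]
    simp
  rw [h, PySem.List.foldl_append_eq_flatMap]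

-- ===== VERDICT (by name: the statement is the Claim_ definition above) =====
theorem mermaid_mindmap_spec : Claim_equal_mermaid_mindmap := by
  intro all_nodes _ _
  unfold Spec_mermaid_mindmap mermaid_mindmap mermaid_mindmap_alt
  dsimp only
  rw [pv_sorted_items, pv_outer_fold]
  simp only [List.flatMap_map, PySem.List.dedup_eq_ofList]
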